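-- pv_equiv track=rewrite | github.com/miurakeita0509/CompetitiveProgramming_python | paiza_A066.py | calculate_max_consecutive_work_days
-- ===== SOURCE A (Python) =====
-- def calculate_max_consecutive_work_days(n, work_periods):
--     # 100,000 日までの配列を用意し、全て 0 で初期化
--     days = [0] * 100001
--
--     # 各仕事の期間を配列にマーク
--     for start, end in work_periods:
--         for day in range(start, end + 1):
--             days[day] = 1
--
--     # 連続出勤日数を計算
--     max_consecutive_days = 0
--     current_streak = 0
--     for day in days:
--         if day == 1:
--             current_streak += 1
--             max_consecutive_days = max(max_consecutive_days, current_streak)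
--         else:
--             current_streak = 0
--
--     return max_consecutive_days
-- ===== SOURCE B (Python) =====
-- def calculate_max_consecutive_work_days(n, work_periods):
--     # Sort the (non-empty) intervals by start and merge adjacent/overlapping ones,
--     # tracking the longest merged block; O(n log n) instead of marking every day.
--     ivs = sorted((p for p in work_periods if p[0] <= p[1]), key=lambda p: p[0])
--     best = 0
--     cur = None
--     for s, e in ivs:
--         if cur is not None and s <= cur[1] + 1:
--             cur = (cur[0], max(cur[1], e))
--         else:
--             cur = (s, e)
--         best = max(best, cur[1] - cur[0] + 1)
--     return best
-- ===== Notes on version B (the rewrite author's own statement) =====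
-- stated objective: faster
-- what changed: B sorts the non-empty intervals by start and merges adjacent/overlapping ones while tracking the longest merged block, instead of A's marking every covered day in a 100001-entry array and scanning the whole board for the longest streak.
-- outside the precondition, e.g. on calculate_max_consecutive_work_days(1, [(-1, 0)]): A returns 1, B returns 2; on calculate_max_consecutive_work_days(1, [(5, 100001)]): A raises IndexError, B returns 99997
import Mathlib
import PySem

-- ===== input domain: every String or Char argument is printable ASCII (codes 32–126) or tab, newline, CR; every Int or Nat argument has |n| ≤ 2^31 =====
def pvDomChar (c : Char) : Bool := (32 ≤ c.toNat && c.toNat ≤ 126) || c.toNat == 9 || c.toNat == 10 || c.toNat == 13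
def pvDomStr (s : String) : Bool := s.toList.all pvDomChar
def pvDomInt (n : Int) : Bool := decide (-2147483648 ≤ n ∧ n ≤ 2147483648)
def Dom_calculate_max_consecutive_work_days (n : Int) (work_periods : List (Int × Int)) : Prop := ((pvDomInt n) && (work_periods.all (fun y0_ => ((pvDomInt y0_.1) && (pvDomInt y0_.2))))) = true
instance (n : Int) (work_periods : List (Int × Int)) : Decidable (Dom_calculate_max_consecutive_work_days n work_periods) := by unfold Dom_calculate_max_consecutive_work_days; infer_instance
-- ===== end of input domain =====

-- B replaces A's 100001-entry day-marking array and full-board streak scan by sort-and-merge of the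
-- intervals themselves; the return values are proved equal on Pre_.

-- ===== PORT A =====
-- Python 'days[day] = 1': a negative index counts from the end of the list, an out-of-range index
-- raises IndexError (excluded by Pre_; setIfInBounds is exact wherever Python does not raise).
def pvMark (a : Array Int) (day : Int) : Array Int :=
  let i := if day < 0 then day + 100001 else day
  a.setIfInBounds i.toNat 1

def pvDayStep (st : Int × Int) (day : Int) : Int × Int :=
  if day == 1 then (max st.1 (st.2 + 1), st.2 + 1) else (st.1, 0)

def calculate_max_consecutive_work_days (n : Int) (work_periods : List (Int × Int)) : Int :=
  let days := Array.replicate 100001 (0 : Int)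
  let days := work_periods.foldl (fun a p => (PySem.List.pyRange p.1 (p.2 + 1)).foldl pvMark a) days
  (days.toList.foldl pvDayStep (0, 0)).1

-- ===== PORT B =====
def pvMerge (st : Int × Option (Int × Int)) (p : Int × Int) : Int × Option (Int × Int) :=
  let cur : Int × Int :=
    match st.2 with
    | some c => if p.1 ≤ c.2 + 1 then (c.1, max c.2 p.2) else p
    | none => p
  (max st.1 (cur.2 - cur.1 + 1), some cur)

def calculate_max_consecutive_work_days_alt (n : Int) (work_periods : List (Int × Int)) : Int :=
  let ivs := PySem.List.sorted (work_periods.filter (fun p => decide (p.1 ≤ p.2))) (fun p => p.1) false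
  (ivs.foldl pvMerge (0, none)).1

-- ===== PRECONDITION & SPEC =====
-- Pre_ restricts every non-empty interval to the problem's natural day board 0..100000: beyond day
-- 100000 (or below day -100001) A raises IndexError, and a negative start makes A mark days at the
-- top of its 100001-day array by negative-index wraparound, an artefact of Python list indexing
-- outside the task's natural domain.
def Pre_calculate_max_consecutive_work_days (n : Int) (work_periods : List (Int × Int)) : Prop :=
  ∀ p ∈ work_periods, p.1 ≤ p.2 → 0 ≤ p.1 ∧ p.2 ≤ 100000
instance (n : Int) (work_periods : List (Int × Int)) : Decidable (Pre_calculate_max_consecutive_work_days n work_periods) := by unfold Pre_calculate_max_consecutive_work_days; infer_instance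

def pvWitness_calculate_max_consecutive_work_days : Int × (List (Int × Int)) := (2, [(5, 7), (1, 3), (8, 9)])

def Spec_calculate_max_consecutive_work_days (n : Int) (work_periods : List (Int × Int)) (out : Int) : Prop := out = calculate_max_consecutive_work_days_alt n work_periods
instance (n : Int) (work_periods : List (Int × Int)) (out : Int) : Decidable (Spec_calculate_max_consecutive_work_days n work_periods out) := by unfold Spec_calculate_max_consecutive_work_days; infer_instance

-- ===== CLAIM (what is proved, stated in full; the proofs are below) =====
def Claim_equal_calculate_max_consecutive_work_days : Prop := ∀ (n : Int) (work_periods : List (Int × Int)), Dom_calculate_max_consecutive_work_days n work_periods → Pre_calculate_max_consecutive_work_days n work_periods → Spec_calculate_max_consecutive_work_days n work_periods (calculate_max_consecutive_work_days n work_periods)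

-- ===== LEMMAS AND PROOFS =====

-- coverage predicate: day d is covered by some interval of l
def pvCov (l : List (Int × Int)) (d : Int) : Bool := l.any (fun p => decide (p.1 ≤ d) && decide (d ≤ p.2))

-- A's streak scan, abstracted over the coverage predicate
def pvBStep (cov : Int → Bool) (st : Int × Int) (d : Int) : Int × Int :=
  if cov d then (max st.1 (st.2 + 1), st.2 + 1) else (st.1, 0)

def pvScan (cov : Int → Bool) (k : Int) : Int × Int :=
  (PySem.List.pyRange 0 k).foldl (pvBStep cov) (0, 0)

theorem pvCov_cons (p : Int × Int) (t : List (Int × Int)) (d : Int) :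
    pvCov (p :: t) d = ((decide (p.1 ≤ d) && decide (d ≤ p.2)) || pvCov t d) := by
  simp [pvCov]

theorem pvCov_append_singleton (q : List (Int × Int)) (p : Int × Int) (d : Int) :
    pvCov (q ++ [p]) d = (pvCov q d || (decide (p.1 ≤ d) && decide (d ≤ p.2))) := by
  simp [pvCov, List.any_append]

theorem pvCov_filter (wp : List (Int × Int)) (d : Int) :
    pvCov (wp.filter (fun p => decide (p.1 ≤ p.2))) d = pvCov wp d := by
  induction wp with
  | nil => rfl
  | cons p t ih =>
    by_cases h : p.1 ≤ p.2
    · simp [pvCov, h] at ih ⊢; rw [ih]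
    · have h1 : (decide (p.1 ≤ d) && decide (d ≤ p.2)) = false := by
        simp; omega
      simp [pvCov, h, h1] at ih ⊢; rw [ih]

-- days above 100000 are never covered under Pre_
theorem pvCov_big (wp : List (Int × Int))
    (hpre : ∀ p ∈ wp, p.1 ≤ p.2 → 0 ≤ p.1 ∧ p.2 ≤ 100000) (d : Int) (hd : 100000 < d) :
    pvCov wp d = false := by
  simp only [pvCov, List.any_eq_false]
  intro p hp
  have := hpre p hp
  simp only [Bool.and_eq_true, decide_eq_true_eq, not_and]
  intro h1 h2
  omega

-- scanning a block of uncovered days resets the streak and keeps the best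
theorem pvScan_false (cov : Int → Bool) (a b : Int) (st : Int × Int)
    (h : ∀ d, a ≤ d → d < b → cov d = false) (hab : a < b) :
    (PySem.List.pyRange a b).foldl (pvBStep cov) st = (st.1, 0) := by
  have hk : ∃ k : Nat, b - a = (k : Int) + 1 := ⟨(b - a - 1).toNat, by omega⟩
  obtain ⟨k, hk⟩ := hk
  induction k generalizing a st with
  | zero =>
    rw [PySem.List.pyRange_one_cons hab, PySem.List.pyRange_one_eq_nil (by omega)]
    simp [pvBStep, h a le_rfl hab]
  | succ m ih =>
    rw [PySem.List.pyRange_one_cons hab]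
    simp only [List.foldl_cons]
    rw [pvBStep, h a le_rfl hab]
    simp only [Bool.false_eq_true, if_false]
    exact ih (a + 1) _ (fun d h1 h2 => h d (by omega) h2) (by omega) (by omega)

-- scanning a block of covered days adds its length to the streak
theorem pvScan_true (cov : Int → Bool) (a b : Int) (st : Int × Int)
    (h : ∀ d, a ≤ d → d < b → cov d = true) (hab : a < b) :
    (PySem.List.pyRange a b).foldl (pvBStep cov) st = (max st.1 (st.2 + (b - a)), st.2 + (b - a)) := by
  have hk : ∃ k : Nat, b - a = (k : Int) + 1 := ⟨(b - a - 1).toNat, by omega⟩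
  obtain ⟨k, hk⟩ := hk
  induction k generalizing a st with
  | zero =>
    rw [PySem.List.pyRange_one_cons hab, PySem.List.pyRange_one_eq_nil (by omega)]
    simp only [List.foldl_cons, List.foldl_nil, pvBStep, h a le_rfl hab, if_true]
    have : b - a = 1 := by omega
    rw [this]
  | succ m ih =>
    rw [PySem.List.pyRange_one_cons hab]
    simp only [List.foldl_cons]
    rw [pvBStep, h a le_rfl hab]
    simp only [if_true]
    rw [ih (a + 1) _ (fun d h1 h2 => h d (by omega) h2) (by omega) (by omega)]
    simp only [Prod.mk.injEq]
    constructor <;> omega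

theorem pvScan_congr (cov cov' : Int → Bool) (k : Int)
    (h : ∀ d, 0 ≤ d → d < k → cov d = cov' d) : pvScan cov k = pvScan cov' k := by
  unfold pvScan
  apply PySem.List.foldl_congr_mem
  intro acc x hx
  rw [PySem.List.mem_pyRange_one] at hx
  simp [pvBStep, h x hx.1 hx.2]

theorem pvScan_snd_zero (cov : Int → Bool) (cs : Int) (h0 : 0 ≤ cs)
    (h : cov (cs - 1) = false) : (pvScan cov cs).2 = 0 := by
  rcases eq_or_lt_of_le h0 with h1 | h1
  · simp [pvScan, PySem.List.pyRange_one_eq_nil (by omega : cs ≤ (0:Int))]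
  · unfold pvScan
    rw [show cs = (cs - 1) + 1 by omega, PySem.List.pyRange_one_succ_right (by omega)]
    rw [List.foldl_append]
    simp [pvBStep, h]

theorem pvScan_fst_zero (cov : Int → Bool) (k : Int) (hk : 0 ≤ k)
    (h : ∀ d, 0 ≤ d → d < k → cov d = false) : (pvScan cov k).1 = 0 := by
  rcases eq_or_lt_of_le hk with h1 | h1
  · simp [pvScan, PySem.List.pyRange_one_eq_nil (by omega : k ≤ (0:Int))]
  · rw [pvScan, pvScan_false cov 0 k (0,0) h h1]

-- the scan of a coverage whose topmost maximal run is [cs,ce]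
theorem pvScan_top (cov : Int → Bool) (cs ce B : Int) (h0 : 0 ≤ cs) (h1 : cs ≤ ce) (h2 : ce < B)
    (htrue : ∀ d, cs ≤ d → d ≤ ce → cov d = true) (hleft : cov (cs - 1) = false)
    (hright : ∀ d, ce < d → d < B → cov d = false) :
    (pvScan cov B).1 = max (pvScan cov cs).1 (ce - cs + 1) := by
  have hsplit : PySem.List.pyRange 0 B = PySem.List.pyRange 0 cs ++ (PySem.List.pyRange cs (ce + 1) ++ PySem.List.pyRange (ce + 1) B) := by
    rw [PySem.List.pyRange_one_append 0 cs B (by omega) (by omega),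
        PySem.List.pyRange_one_append cs (ce + 1) B (by omega) (by omega)]
  have hst0 : (pvScan cov cs) = ((pvScan cov cs).1, 0) := by
    have := pvScan_snd_zero cov cs h0 hleft
    exact Prod.ext rfl this
  unfold pvScan at *
  rw [hsplit, List.foldl_append, List.foldl_append]
  rw [show List.foldl (pvBStep cov) (0,0) (PySem.List.pyRange 0 cs) = ((pvScan cov cs).1, 0) from hst0 ▸ rfl]
  rw [pvScan_true cov cs (ce + 1) _ (fun d ha hb => htrue d ha (by omega)) (by omega)]
  rcases eq_or_lt_of_le (show ce + 1 ≤ B by omega) with hB | hB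
  · rw [← hB, PySem.List.pyRange_one_eq_nil le_rfl]
    simp only [List.foldl_nil]
    omega
  · rw [pvScan_false cov (ce + 1) B _ (fun d ha hb => hright d (by omega) hb) hB]
    omega

-- ===== A-side characterisation =====
-- marking one interval sets exactly its days to 1
theorem pvMark_range (k : Nat) : ∀ (s : Int) (a : Array Int), 0 ≤ s → s + k ≤ 100001 → a.size = 100001 →
    ((PySem.List.pyRange s (s + k)).foldl pvMark a).size = 100001 ∧
    ∀ i : Nat, ((PySem.List.pyRange s (s + k)).foldl pvMark a)[i]? =
      (if s ≤ (i : Int) ∧ (i : Int) < s + k then some 1 else a[i]?) := by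
  induction k with
  | zero =>
    intro s a h0 hk hsz
    rw [show s + (0:Nat) = s by omega, PySem.List.pyRange_one_eq_nil le_rfl]
    refine ⟨hsz, fun i => ?_⟩
    simp only [List.foldl_nil]
    rw [if_neg (by omega)]
  | succ m ih =>
    intro s a h0 hk hsz
    rw [PySem.List.pyRange_one_cons (by omega : s < s + ((m:Nat)+1:Nat))]
    simp only [List.foldl_cons]
    have ha' : (pvMark a s).size = 100001 := by
      simp [pvMark, Array.size_setIfInBounds, hsz]
    have hs' : s + ((m + 1 : Nat) : Int) = (s + 1) + (m : Int) := by push_cast; ring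
    have hmain := ih (s + 1) (pvMark a s) (by omega) (by push_cast at hk ⊢; omega) ha'
    rw [hs'] at *
    refine ⟨hmain.1, fun i => ?_⟩
    rw [hmain.2 i]
    have hget : (pvMark a s)[i]? = if (s : Int) = (i : Int) then some 1 else a[i]? := by
      simp only [pvMark, if_neg (by omega : ¬ s < 0)]
      rw [Array.getElem?_setIfInBounds]
      by_cases e : (s : Int) = (i : Int)
      · rw [if_pos e, if_pos (by omega), if_pos (by omega)]
      · rw [if_neg e, if_neg (by omega)]
    rw [hget]
    split_ifs <;> first | rfl | omega

-- after marking all intervals, a day holds 1 exactly when it is covered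
theorem pvMark_all (wp : List (Int × Int)) : ∀ (a : Array Int),
    (∀ p ∈ wp, p.1 ≤ p.2 → 0 ≤ p.1 ∧ p.2 ≤ 100000) → a.size = 100001 →
    (wp.foldl (fun a p => (PySem.List.pyRange p.1 (p.2 + 1)).foldl pvMark a) a).size = 100001 ∧
    ∀ i : Nat, (wp.foldl (fun a p => (PySem.List.pyRange p.1 (p.2 + 1)).foldl pvMark a) a)[i]? =
      (if pvCov wp (i : Int) then some 1 else a[i]?) := by
  induction wp with
  | nil =>
    intro a _ hsz
    refine ⟨hsz, fun i => ?_⟩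
    simp [pvCov]
  | cons p t ih =>
    intro a hpre hsz
    simp only [List.foldl_cons]
    by_cases hp : p.1 ≤ p.2
    · obtain ⟨hp0, hp1⟩ := hpre p (List.mem_cons_self ..) hp
      have hk : p.2 + 1 = p.1 + ((p.2 + 1 - p.1).toNat : Int) := by omega
      have hmr := pvMark_range (p.2 + 1 - p.1).toNat p.1 a hp0 (by omega) hsz
      rw [← hk] at hmr
      have hrec := ih _ (fun q hq => hpre q (List.mem_cons_of_mem _ hq)) hmr.1
      refine ⟨hrec.1, fun i => ?_⟩
      rw [hrec.2 i, hmr.2 i, pvCov_cons]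
      by_cases hc : pvCov t (i : Int)
      · rw [hc]; simp
      · rw [eq_false_of_ne_true hc]
        simp only [Bool.false_eq_true, if_false, Bool.or_false]
        by_cases hin : p.1 ≤ (i : Int) ∧ (i : Int) ≤ p.2
        · rw [if_pos (by omega), if_pos (by simp; omega)]
        · rw [if_neg (by omega), if_neg (by simp; omega)]
    · have hnil : PySem.List.pyRange p.1 (p.2 + 1) = [] := PySem.List.pyRange_one_eq_nil (by omega)
      rw [hnil]
      simp only [List.foldl_nil]
      have hrec := ih a (fun q hq => hpre q (List.mem_cons_of_mem _ hq)) hsz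
      refine ⟨hrec.1, fun i => ?_⟩
      rw [hrec.2 i, pvCov_cons]
      have : (decide (p.1 ≤ (i:Int)) && decide ((i:Int) ≤ p.2)) = false := by simp; omega
      rw [this, Bool.false_or]

set_option maxRecDepth 10000 in
theorem pvA_eq (n : Int) (wp : List (Int × Int))
    (hpre : ∀ p ∈ wp, p.1 ≤ p.2 → 0 ≤ p.1 ∧ p.2 ≤ 100000) :
    calculate_max_consecutive_work_days n wp = (pvScan (pvCov wp) 100001).1 := by
  simp only [calculate_max_consecutive_work_days]
  have hma := pvMark_all wp (Array.replicate 100001 0) hpre (by simp)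
  have hlist : (wp.foldl (fun a p => (PySem.List.pyRange p.1 (p.2 + 1)).foldl pvMark a)
      (Array.replicate 100001 (0:Int))).toList =
      (PySem.List.pyRange 0 100001).map (fun d => if pvCov wp d then (1:Int) else 0) := by
    apply List.ext_getElem?
    intro i
    rw [Array.getElem?_toList, hma.2 i]
    by_cases hi : i < 100001
    · rw [show (100001:Int) = ((100001:Nat):Int) by norm_num,
          PySem.List.getElem?_map_pyRange_zero _ _ _ (by exact_mod_cast hi)]
      rw [Array.getElem?_replicate, if_pos hi]
      by_cases hc : pvCov wp (i : Int)
      · rw [if_pos hc, if_pos hc]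
      · rw [if_neg hc, if_neg hc]
    · have hc : pvCov wp (i : Int) = false := pvCov_big wp hpre _ (by omega)
      rw [hc]
      simp only [Bool.false_eq_true, if_false]
      rw [Array.getElem?_replicate, if_neg hi]
      symm
      apply List.getElem?_eq_none
      rw [List.length_map, PySem.List.length_pyRange_one]
      omega
  rw [hlist, List.foldl_map]
  unfold pvScan
  exact congrArg Prod.fst (PySem.List.foldl_congr_mem _ _ _ _
    (fun acc x _ => by by_cases hc : pvCov wp x <;> simp [pvDayStep, pvBStep, hc]))

-- ===== B-side characterisation =====
-- invariant of the merge fold: the current block [cs,ce] is the topmost maximal run of the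
-- coverage of the processed intervals q, and best is the streak-scan value of that coverage
theorem pvMerge_inv (l : List (Int × Int)) : ∀ (q : List (Int × Int)) (best cs ce : Int),
    (∀ p ∈ l, 0 ≤ p.1 ∧ p.1 ≤ p.2 ∧ p.2 ≤ 100000) →
    List.Pairwise (fun a b : Int × Int => a.1 ≤ b.1) l →
    (∀ p ∈ l, cs ≤ p.1) →
    0 ≤ cs → cs ≤ ce → ce ≤ 100000 →
    (∀ d : Int, cs ≤ d → d ≤ ce → pvCov q d = true) →
    pvCov q (cs - 1) = false →
    (∀ d : Int, ce < d → pvCov q d = false) →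
    best = (pvScan (pvCov q) 100001).1 →
    (l.foldl pvMerge (best, some (cs, ce))).1 = (pvScan (pvCov (q ++ l)) 100001).1 := by
  induction l with
  | nil =>
    intro q best cs ce _ _ _ _ _ _ _ _ _ hbest
    simpa using hbest
  | cons p t ih =>
    intro q best cs ce hbnd hpw hcs h0 h1 h2 hcov hleft hright hbest
    have hpb := hbnd p (List.mem_cons_self ..)
    have hps : cs ≤ p.1 := hcs p (List.mem_cons_self ..)
    have hbnd' : ∀ r ∈ t, 0 ≤ r.1 ∧ r.1 ≤ r.2 ∧ r.2 ≤ 100000 :=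
      fun r hr => hbnd r (List.mem_cons_of_mem _ hr)
    have hpw' : List.Pairwise (fun a b : Int × Int => a.1 ≤ b.1) t := hpw.of_cons
    have hhead : ∀ r ∈ t, p.1 ≤ r.1 := fun r hr => List.rel_of_pairwise_cons hpw hr
    have hq' : ∀ d : Int, pvCov (q ++ [p]) d = (pvCov q d || (decide (p.1 ≤ d) && decide (d ≤ p.2))) :=
      pvCov_append_singleton q p
    have happ : q ++ p :: t = (q ++ [p]) ++ t := by simp
    rw [happ]
    simp only [List.foldl_cons]
    by_cases hm : p.1 ≤ ce + 1
    · -- merge into the current block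
      have hmerge : pvMerge (best, some (cs, ce)) p = (max best (max ce p.2 - cs + 1), some (cs, max ce p.2)) := by
        simp [pvMerge, hm]
      rw [hmerge]
      apply ih (q ++ [p]) _ cs (max ce p.2) hbnd' hpw'
        (fun r hr => le_trans hps (hhead r hr)) h0 (by omega) (by omega)
      · intro d hd1 hd2
        rw [hq']
        by_cases hdc : d ≤ ce
        · rw [hcov d hd1 hdc]; simp
        · have : (decide (p.1 ≤ d) && decide (d ≤ p.2)) = true := by simp <;> omega
          rw [this]; simp
      · rw [hq', hleft]
        simp only [Bool.false_or]
        simp only [Bool.and_eq_false_iff, decide_eq_false_iff_not]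
        left; omega
      · intro d hd
        rw [hq', hright d (by omega)]
        simp only [Bool.false_or, Bool.and_eq_false_iff, decide_eq_false_iff_not]
        right; omega
      · -- best update equals the scan of the extended coverage
        have hnew := pvScan_top (pvCov (q ++ [p])) cs (max ce p.2) 100001 h0 (by omega) (by omega)
          (fun d hd1 hd2 => by
            rw [hq']
            by_cases hdc : d ≤ ce
            · rw [hcov d hd1 hdc]; simp
            · have : (decide (p.1 ≤ d) && decide (d ≤ p.2)) = true := by simp <;> omega
              rw [this]; simp)
          (by rw [hq', hleft]; simp <;> omega)
          (fun d hd1 hd2 => by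
            rw [hq', hright d (by omega)]
            simp only [Bool.false_or, Bool.and_eq_false_iff, decide_eq_false_iff_not]
            right; omega)
        have hold := pvScan_top (pvCov q) cs ce 100001 h0 h1 (by omega) hcov hleft
          (fun d hd1 _ => hright d hd1)
        have hpre : (pvScan (pvCov (q ++ [p])) cs).1 = (pvScan (pvCov q) cs).1 := by
          rw [pvScan_congr (pvCov (q ++ [p])) (pvCov q) cs
            (fun d hd1 hd2 => by
              rw [hq']
              have : (decide (p.1 ≤ d) && decide (d ≤ p.2)) = false := by simp <;> omega
              rw [this]; simp)]
        rw [hnew, hpre, hbest, hold]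
        omega
    · -- start a new block at p
      have hmerge : pvMerge (best, some (cs, ce)) p = (max best (p.2 - p.1 + 1), some (p.1, p.2)) := by
        simp [pvMerge, if_neg hm]
      rw [hmerge]
      apply ih (q ++ [p]) _ p.1 p.2 hbnd' hpw' hhead (by omega) (by omega) (by omega)
      · intro d hd1 hd2
        rw [hq']
        have : (decide (p.1 ≤ d) && decide (d ≤ p.2)) = true := by simp <;> omega
        rw [this]; simp
      · rw [hq', hright (p.1 - 1) (by omega)]
        simp
      · intro d hd
        rw [hq', hright d (by omega)]
        simp <;> omega
      · have hnew := pvScan_top (pvCov (q ++ [p])) p.1 p.2 100001 (by omega) (by omega) (by omega)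
          (fun d hd1 hd2 => by
            rw [hq']
            have : (decide (p.1 ≤ d) && decide (d ≤ p.2)) = true := by simp <;> omega
            rw [this]; simp)
          (by rw [hq', hright (p.1 - 1) (by omega)]; simp)
          (fun d hd1 hd2 => by rw [hq', hright d (by omega)]; simp <;> omega)
        have hpre : (pvScan (pvCov (q ++ [p])) p.1).1 = (pvScan (pvCov q) p.1).1 := by
          rw [pvScan_congr (pvCov (q ++ [p])) (pvCov q) p.1
            (fun d hd1 hd2 => by
              rw [hq']
              have : (decide (p.1 ≤ d) && decide (d ≤ p.2)) = false := by simp <;> omega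
              rw [this]; simp)]
        have hold' := pvScan_top (pvCov q) cs ce p.1 h0 h1 (by omega) hcov hleft
          (fun d hd1 _ => hright d hd1)
        have hold := pvScan_top (pvCov q) cs ce 100001 h0 h1 (by omega) hcov hleft
          (fun d hd1 _ => hright d hd1)
        rw [hnew, hpre, hold', hbest, hold]

-- A = B on Pre_
theorem pv_final (n : Int) (wp : List (Int × Int))
    (hpre : ∀ p ∈ wp, p.1 ≤ p.2 → 0 ≤ p.1 ∧ p.2 ≤ 100000) :
    calculate_max_consecutive_work_days n wp = calculate_max_consecutive_work_days_alt n wp := by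
  rw [pvA_eq n wp hpre]
  simp only [calculate_max_consecutive_work_days_alt]
  have hperm := PySem.List.sorted_perm (wp.filter (fun p => decide (p.1 ≤ p.2))) (fun p : Int × Int => p.1) false
  have hcovs : pvCov (PySem.List.sorted (wp.filter (fun p => decide (p.1 ≤ p.2))) (fun p : Int × Int => p.1) false) = pvCov wp := by
    funext d
    exact (hperm.any_eq).trans (pvCov_filter wp d)
  have hpw := PySem.List.sorted_pairwise (wp.filter (fun p => decide (p.1 ≤ p.2))) (fun p : Int × Int => p.1)
  have hbnd : ∀ p ∈ PySem.List.sorted (wp.filter (fun p => decide (p.1 ≤ p.2))) (fun p : Int × Int => p.1) false,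
      0 ≤ p.1 ∧ p.1 ≤ p.2 ∧ p.2 ≤ 100000 := by
    intro p hp
    have hmem := (hperm.mem_iff).1 hp
    rw [List.mem_filter] at hmem
    have h1 : p.1 ≤ p.2 := by simpa using hmem.2
    have := hpre p hmem.1 h1
    exact ⟨this.1, h1, this.2⟩
  rw [← hcovs]
  set ivs := PySem.List.sorted (wp.filter (fun p => decide (p.1 ≤ p.2))) (fun p : Int × Int => p.1) false with hivs
  clear_value ivs
  cases ivs with
  | nil =>
    simp only [List.foldl_nil]
    exact pvScan_fst_zero _ _ (by omega) (fun d _ _ => by simp [pvCov])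
  | cons h t =>
    have hh := hbnd h (List.mem_cons_self ..)
    simp only [List.foldl_cons]
    have hm0 : pvMerge (0, none) h = (max 0 (h.2 - h.1 + 1), some (h.1, h.2)) := by
      simp [pvMerge]
    rw [hm0]
    have hcov1 : ∀ d : Int, h.1 ≤ d → d ≤ h.2 → pvCov [h] d = true := by
      intro d h1 h2; simp [pvCov] <;> omega
    have hstep := pvMerge_inv t [h] (max 0 (h.2 - h.1 + 1)) h.1 h.2
      (fun r hr => hbnd r (List.mem_cons_of_mem _ hr))
      hpw.of_cons
      (fun r hr => List.rel_of_pairwise_cons hpw hr)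
      (by omega) (by omega) (by omega)
      hcov1
      (by simp [pvCov])
      (fun d hd => by simp [pvCov] <;> omega)
      (by
        rw [pvScan_top (pvCov [h]) h.1 h.2 100001 (by omega) (by omega) (by omega)
          hcov1 (by simp [pvCov]) (fun d hd _ => by simp [pvCov] <;> omega)]
        rw [pvScan_fst_zero (pvCov [h]) h.1 (by omega)
          (fun d hd1 hd2 => by simp [pvCov] <;> omega)])
    rw [hstep]
    rfl

-- ===== VERDICT (by name: the statement is the Claim_ definition above) =====
theorem calculate_max_consecutive_work_days_spec : Claim_equal_calculate_max_consecutive_work_days := by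
  intro n work_periods _ hpre
  unfold Spec_calculate_max_consecutive_work_days
  exact pv_final n work_periods hpre
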